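-- pv_equiv track=rewrite | github.com/jstuart0/project-athena-oss | src/shared/tool_registry.py | _domain_matches
-- ===== SOURCE A (Python) =====
-- from typing import Dict, List, Any, Optional
--
-- def _domain_matches(domain: str, patterns: List[str]) -> bool:
--     """Check if domain matches any pattern in list (supports wildcards)."""
--     domain = domain.lower()
--
--     for pattern in patterns:
--         pattern = pattern.lower()
--
--         # Exact match
--         if domain == pattern:
--             return True
--
--         # Wildcard match (*.example.com matches sub.example.com but not notexample.com)
--         if pattern.startswith("*."):
--             suffix = pattern[2:]  # Remove "*."
--             # Must be exact suffix match or have a dot before the suffix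
--             if domain == suffix:
--                 return True
--             if domain.endswith("." + suffix):
--                 return True
--
--     return False
-- ===== SOURCE B (Python) =====
-- from typing import List
--
-- def _domain_matches(domain: str, patterns: List[str]) -> bool:
--     """Check if domain matches any pattern in list (supports wildcards)."""
--     pats = {p.lower() for p in patterns}
--     d = domain.lower()
--     if d in pats:
--         return True
--     if "*." + d in pats:
--         return True
--     for i, ch in enumerate(d):
--         if ch == "." and "*." + d[i + 1:] in pats:
--             return True
--     return False
-- ===== Notes on version B (the rewrite author's own statement) =====
-- stated objective: alternative
-- what changed: Instead of scanning every pattern and testing it against the domain, B builds a set of lowered patterns once and probes it with the domain's candidate keys: the domain itself and '*.'+tail for the full domain and each dot-bounded tail; same cost when the set is built per call.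
import Mathlib
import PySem

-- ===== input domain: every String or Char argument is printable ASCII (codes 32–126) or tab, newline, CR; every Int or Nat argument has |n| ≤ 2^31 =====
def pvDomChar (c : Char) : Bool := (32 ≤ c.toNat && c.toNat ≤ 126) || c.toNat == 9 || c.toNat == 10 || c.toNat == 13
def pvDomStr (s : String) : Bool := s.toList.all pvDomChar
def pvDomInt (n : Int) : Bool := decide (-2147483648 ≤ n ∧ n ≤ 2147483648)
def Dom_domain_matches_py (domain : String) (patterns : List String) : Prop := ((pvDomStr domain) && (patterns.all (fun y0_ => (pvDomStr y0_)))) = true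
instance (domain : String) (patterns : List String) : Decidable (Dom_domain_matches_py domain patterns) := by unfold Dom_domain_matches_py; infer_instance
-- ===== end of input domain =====

-- B replaces A's per-pattern tests by a set of the lowered patterns probed with the
-- domain's dot-bounded suffix keys (alternative decomposition, same return value).

-- ===== PORT A =====
-- the 'for pattern in patterns' loop with its early returns
def dmLoopA (d : List Char) : List (List Char) → Bool
  | [] => false
  | p :: rest =>
    let q := PySem.Chars.lower p
    if d = q then true
    else if PySem.Chars.startswith q ['*', '.'] then
      let suffix := PySem.List.slice q (some 2) none   -- pattern[2:]
      if d = suffix then true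
      else if PySem.Chars.endswith d ('.' :: suffix) then true
      else dmLoopA d rest
    else dmLoopA d rest

def domain_matches_py (domain : String) (patterns : List String) : Bool :=
  dmLoopA (PySem.Chars.lower domain.toList) (patterns.map String.toList)

-- ===== PORT B =====
-- the 'for i, ch in enumerate(d)' loop with its early return
def dmLoopB (pats : PySem.Set (List Char)) (d : List Char) : List (Int × Char) → Bool
  | [] => false
  | (i, c) :: rest =>
    if (c == '.') && pats.contains ('*' :: '.' :: PySem.List.slice d (some (i + 1)) none) then true
    else dmLoopB pats d rest

def domain_matches_py_alt (domain : String) (patterns : List String) : Bool :=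
  let pats : PySem.Set (List Char) :=
    PySem.Set.ofList (patterns.map (fun p => PySem.Chars.lower p.toList))
  let d := PySem.Chars.lower domain.toList
  if pats.contains d then true
  else if pats.contains ('*' :: '.' :: d) then true
  else dmLoopB pats d (PySem.List.enumerate d)

-- ===== PRECONDITION & SPEC =====
def Spec_domain_matches_py (domain : String) (patterns : List String) (out : Bool) : Prop := out = domain_matches_py_alt domain patterns
instance (domain : String) (patterns : List String) (out : Bool) : Decidable (Spec_domain_matches_py domain patterns out) := by unfold Spec_domain_matches_py; infer_instance

-- ===== CLAIM (what is proved, stated in full; the proofs are below) =====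
def Claim_equal_domain_matches_py : Prop := ∀ (domain : String) (patterns : List String), Dom_domain_matches_py domain patterns → Spec_domain_matches_py domain patterns (domain_matches_py domain patterns)

-- ===== LEMMAS AND PROOFS =====

-- the per-pattern test A applies to the (lowered) pattern q
def matchOne (d q : List Char) : Bool :=
  (d == q) || (PySem.Chars.startswith q ['*', '.'] &&
    ((d == q.drop 2) || PySem.Chars.endswith d ('.' :: q.drop 2)))

theorem dmLoopA_eq_any (d : List Char) (ps : List (List Char)) :
    dmLoopA d ps = ps.any (fun p => matchOne d (PySem.Chars.lower p)) := by
  induction ps with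
  | nil => rfl
  | cons p rest ih =>
    simp only [dmLoopA, List.any_cons,
      PySem.List.slice_from (xs := PySem.Chars.lower p) (a := 2) (by norm_num)]
    norm_num
    split_ifs <;> rw [Bool.eq_iff_iff] <;> simp_all [matchOne, or_assoc]

-- a '.'-headed suffix of d is exactly "d after some dot position"
theorem suffix_dot (d s : List Char) :
    ('.' :: s) <:+ d ↔ ∃ k : Nat, k < d.length ∧ d[k]? = some '.' ∧ d.drop (k + 1) = s := by
  constructor
  · rintro ⟨pre, rfl⟩
    refine ⟨pre.length, by simp, ?_, ?_⟩
    · simp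
    · have : (pre ++ '.' :: s).drop pre.length = '.' :: s := List.drop_left
      have hlt : pre.length < (pre ++ '.' :: s).length := by simp
      rw [List.drop_eq_getElem_cons hlt] at this
      exact (List.cons.injEq _ _ _ _ ▸ this).2
  · rintro ⟨k, hk, hget, hdrop⟩
    have : d.drop k = '.' :: s := by
      rw [List.drop_eq_getElem_cons hk, hdrop]
      have : d[k] = '.' := by simpa [List.getElem?_eq_getElem hk] using hget
      rw [this]
    rw [← this]
    exact List.drop_suffix k d

-- B's enumerate loop finds exactly the dot positions whose tail key is in the set
theorem dmLoopB_enum (pats : PySem.Set (List Char)) (d₀ : List Char) :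
    ∀ (t : List Char) (n : Int),
      (dmLoopB pats d₀ (PySem.List.enumerate t n) = true ↔
        ∃ k : Nat, k < t.length ∧ t[k]? = some '.' ∧
          pats.contains ('*' :: '.' :: PySem.List.slice d₀ (some (n + k + 1)) none) = true) := by
  intro t
  induction t with
  | nil => intro n; simp [PySem.List.enumerate, dmLoopB]
  | cons c rest ih =>
    intro n
    have hcons : PySem.List.enumerate (c :: rest) n = (n, c) :: PySem.List.enumerate rest (n + 1) := rfl
    rw [hcons]
    simp only [dmLoopB]
    split_ifs with h
    · simp only [Bool.and_eq_true, beq_iff_eq] at h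
      constructor
      · intro _
        exact ⟨0, by simp, by simp [h.1], by simpa using h.2⟩
      · intro _; rfl
    · rw [ih (n + 1)]
      constructor
      · rintro ⟨k, hk, hget, hc⟩
        refine ⟨k + 1, by simpa using hk, by simpa using hget, ?_⟩
        have : n + (↑(k + 1) : Int) + 1 = n + 1 + ↑k + 1 := by push_cast; ring
        rw [this]; exact hc
      · rintro ⟨k, hk, hget, hc⟩
        match k with
        | 0 =>
          exfalso
          apply h
          simp only [Bool.and_eq_true, beq_iff_eq]
          refine ⟨by simpa using hget, ?_⟩
          simpa using hc
        | k + 1 =>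
          refine ⟨k, by simp only [List.length_cons] at hk; omega, by simpa using hget, ?_⟩
          have : n + 1 + (↑k : Int) + 1 = n + ↑(k + 1) + 1 := by push_cast; ring
          rw [this]; exact hc

-- per-pattern: A's test on q holds iff q is one of B's candidate keys
theorem matchOne_iff (d q : List Char) :
    matchOne d q = true ↔
      q = d ∨ q = '*' :: '.' :: d ∨
        ∃ k : Nat, k < d.length ∧ d[k]? = some '.' ∧ q = '*' :: '.' :: d.drop (k + 1) := by
  unfold matchOne
  simp only [Bool.or_eq_true, Bool.and_eq_true, beq_iff_eq, PySem.Chars.startswith,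
    PySem.Chars.endswith, List.isPrefixOf_iff_prefix, List.isSuffixOf_iff_suffix]
  constructor
  · rintro (rfl | ⟨⟨t, rfl⟩, htail⟩)
    · exact Or.inl rfl
    · simp only [List.cons_append, List.nil_append] at *
      have hdrop : (('*' : Char) :: '.' :: t).drop 2 = t := rfl
      rw [hdrop] at htail
      rcases htail with rfl | hsuf
      · exact Or.inr (Or.inl rfl)
      · rcases (suffix_dot d t).mp hsuf with ⟨k, hk, hget, hdr⟩
        exact Or.inr (Or.inr ⟨k, hk, hget, by rw [hdr]⟩)
  · rintro (rfl | rfl | ⟨k, hk, hget, rfl⟩)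
    · exact Or.inl rfl
    · exact Or.inr ⟨⟨d, rfl⟩, Or.inl rfl⟩
    · refine Or.inr ⟨⟨d.drop (k + 1), rfl⟩, Or.inr ?_⟩
      exact (suffix_dot d _).mpr ⟨k, hk, hget, rfl⟩

theorem main_eq (d : List Char) (ps : List (List Char)) :
    dmLoopA d ps =
      (let pats : PySem.Set (List Char) := PySem.Set.ofList (ps.map PySem.Chars.lower)
       if pats.contains d then true
       else if pats.contains ('*' :: '.' :: d) then true
       else dmLoopB pats d (PySem.List.enumerate d)) := by
  set pats : PySem.Set (List Char) := PySem.Set.ofList (ps.map PySem.Chars.lower) with hpats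
  have hmem : ∀ x : List Char,
      pats.contains x = true ↔ ∃ p ∈ ps, PySem.Chars.lower p = x := by
    intro x
    rw [hpats, PySem.Set.contains_iff, PySem.Set.mem_ofList]
    simp [List.mem_map]
  rw [Bool.eq_iff_iff]
  rw [dmLoopA_eq_any, List.any_eq_true]
  have hB : (if pats.contains d then true
       else if pats.contains ('*' :: '.' :: d) then true
       else dmLoopB pats d (PySem.List.enumerate d)) = true ↔
      (d ∈ pats ∨ '*' :: '.' :: d ∈ pats ∨
        dmLoopB pats d (PySem.List.enumerate d) = true) := by
    split_ifs with h1 h2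
    · simp only [true_iff]; exact Or.inl ((PySem.Set.contains_iff _ _).mp h1)
    · simp only [true_iff]; exact Or.inr (Or.inl ((PySem.Set.contains_iff _ _).mp h2))
    · rw [PySem.Set.contains_iff] at h1 h2
      simp [h1, h2]
  rw [hB]
  have hloop := dmLoopB_enum pats d
  constructor
  · rintro ⟨p, hp, hm⟩
    rcases (matchOne_iff d _).mp hm with h | h | ⟨k, hk, hget, h⟩
    · exact Or.inl ((PySem.Set.contains_iff _ _).mp ((hmem d).mpr ⟨p, hp, h⟩))
    · exact Or.inr (Or.inl ((PySem.Set.contains_iff _ _).mp ((hmem _).mpr ⟨p, hp, h⟩)))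
    · refine Or.inr (Or.inr ?_)
      rw [hloop d 0]
      refine ⟨k, hk, hget, ?_⟩
      have hsl : PySem.List.slice d (some ((0 : Int) + ↑k + 1)) none = d.drop (k + 1) := by
        rw [PySem.List.slice_from _ (by positivity)]
        congr 1
        omega
      rw [hsl]
      exact (hmem _).mpr ⟨p, hp, h⟩
  · rintro (h | h | h)
    · obtain ⟨p, hp, hx⟩ := (hmem d).mp ((PySem.Set.contains_iff _ _).mpr h)
      exact ⟨p, hp, (matchOne_iff d _).mpr (Or.inl hx)⟩
    · obtain ⟨p, hp, hx⟩ := (hmem _).mp ((PySem.Set.contains_iff _ _).mpr h)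
      exact ⟨p, hp, (matchOne_iff d _).mpr (Or.inr (Or.inl hx))⟩
    · rw [hloop d 0] at h
      obtain ⟨k, hk, hget, hc⟩ := h
      have hsl : PySem.List.slice d (some ((0 : Int) + ↑k + 1)) none = d.drop (k + 1) := by
        rw [PySem.List.slice_from _ (by positivity)]
        congr 1
        omega
      rw [hsl] at hc
      obtain ⟨p, hp, hx⟩ := (hmem _).mp hc
      exact ⟨p, hp, (matchOne_iff d _).mpr (Or.inr (Or.inr ⟨k, hk, hget, hx⟩))⟩

-- ===== VERDICT (by name: the statement is the Claim_ definition above) =====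
theorem domain_matches_py_spec : Claim_equal_domain_matches_py := by
  intro domain patterns _
  unfold Spec_domain_matches_py domain_matches_py domain_matches_py_alt
  have := main_eq (PySem.Chars.lower domain.toList) (patterns.map String.toList)
  simpa [List.map_map, Function.comp] using this
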